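-- pv_equiv track=rewrite | github.com/Edimilton/Contests-Juiz-Online | CodeForces/1339B - Sorted Adjacent Differences.py | ordena_adj
-- ===== SOURCE A (Python) =====
-- def ordena_adj(lista):
--   result = []
--   tamanho = len(lista)
--   esq = dir = tamanho // 2
--
--   if (tamanho%2) == 0:
--     esq -= 1
--   else:
--     result.append(lista[dir])
--     esq -= 1
--     dir += 1
--
--   while esq >= 0 and dir < tamanho:
--     result.append(lista[esq])
--     result.append(lista[dir])
--     esq -= 1
--     dir += 1
--
--   return result
-- ===== SOURCE B (Python) =====
-- def ordena_adj(lista):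
--   n = len(lista)
--   # rank of index i in the middle-outward order: distance from the centre
--   # (scaled by 2 to stay integral), left element before right on ties
--   order = sorted(range(n), key=lambda i: 2 * abs(2 * i - (n - 1)) + (2 * i > n - 1))
--   return [lista[i] for i in order]
-- ===== Notes on version B (the rewrite author's own statement) =====
-- stated objective: alternative
-- what changed: Replaces A's middle-outward two-pointer while-loop by a single sort of the indices on an integral distance-from-centre key (left before right on ties) and one gather pass.
import Mathlib
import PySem

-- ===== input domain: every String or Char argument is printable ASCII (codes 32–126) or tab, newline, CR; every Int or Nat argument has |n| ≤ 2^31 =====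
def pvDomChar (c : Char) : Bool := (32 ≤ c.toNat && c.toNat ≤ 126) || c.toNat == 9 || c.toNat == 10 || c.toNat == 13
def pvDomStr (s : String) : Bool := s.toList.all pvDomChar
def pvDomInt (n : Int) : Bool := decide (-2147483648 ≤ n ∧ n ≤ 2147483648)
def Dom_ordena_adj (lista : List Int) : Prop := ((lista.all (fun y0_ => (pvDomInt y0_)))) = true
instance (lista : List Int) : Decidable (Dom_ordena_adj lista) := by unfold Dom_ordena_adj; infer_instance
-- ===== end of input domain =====

-- B replaces A's outward two-pointer while-loop by one sort of the indices on an
-- integral distance-from-centre key (objective: alternative algorithm, not faster).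

-- ===== PORT A =====
-- the while-loop of A: appends lista[esq], lista[dir] while esq >= 0 and dir < tamanho;
-- fuel only bounds the iteration count (lista.length always suffices, see loop lemma below)
def ordenaLoop (lista : List Int) (tamanho : Int) : Nat → List Int → Int → Int → List Int
  | 0, result, _, _ => result
  | fuel+1, result, esq, dir =>
    if esq ≥ 0 ∧ dir < tamanho then
      ordenaLoop lista tamanho fuel
        (result ++ [PySem.List.pyGetD lista esq 0, PySem.List.pyGetD lista dir 0])
        (esq - 1) (dir + 1)
    else result

def ordena_adj (lista : List Int) : List Int :=
  let tamanho : Int := PySem.List.len lista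
  let mid : Int := PySem.Int.floordiv tamanho 2
  if PySem.Int.mod tamanho 2 = 0 then
    ordenaLoop lista tamanho lista.length [] (mid - 1) mid
  else
    ordenaLoop lista tamanho lista.length [PySem.List.pyGetD lista mid 0] (mid - 1) (mid + 1)

-- ===== PORT B =====
-- the sort key of Source B: 2*abs(2*i - (n-1)) + (2*i > n-1)
def ordenaKey (n i : Int) : Int := 2 * |2 * i - (n - 1)| + (if 2 * i > n - 1 then 1 else 0)

def ordena_adj_alt (lista : List Int) : List Int :=
  let n : Int := PySem.List.len lista
  let order := PySem.List.sorted (PySem.List.pyRange 0 n 1) (ordenaKey n)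
  order.map (fun i => PySem.List.pyGetD lista i 0)

-- ===== PRECONDITION & SPEC =====
def Spec_ordena_adj (lista : List Int) (out : List Int) : Prop := out = ordena_adj_alt lista
instance (lista : List Int) (out : List Int) : Decidable (Spec_ordena_adj lista out) := by unfold Spec_ordena_adj; infer_instance

-- ===== CLAIM (what is proved, stated in full; the proofs are below) =====
def Claim_equal_ordena_adj : Prop := ∀ (lista : List Int), Dom_ordena_adj lista → Spec_ordena_adj lista (ordena_adj lista)

-- ===== LEMMAS AND PROOFS =====

-- the index sequence A's loop visits: e, d, e-1, d+1, … for k rounds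
def pairsIdx : Nat → Int → Int → List Int
  | 0, _, _ => []
  | k+1, e, d => e :: d :: pairsIdx k (e - 1) (d + 1)

theorem mem_pairsIdx {x : Int} : ∀ (k : Nat) (e d : Int), x ∈ pairsIdx k e d → x ≤ e ∨ d ≤ x := by
  intro k
  induction k with
  | zero => intro e d h; simp [pairsIdx] at h
  | succ k ih =>
    intro e d h
    simp only [pairsIdx, List.mem_cons] at h
    rcases h with h | h | h
    · omega
    · omega
    · rcases ih (e - 1) (d + 1) h with h' | h' <;> omega

theorem ordenaKey_left {n x : Int} (h : 2 * x ≤ n - 1) : ordenaKey n x = 2 * (n - 1 - 2 * x) := by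
  unfold ordenaKey
  rw [abs_of_nonpos (by omega), if_neg (by omega)]
  omega

theorem ordenaKey_right {n x : Int} (h : n - 1 < 2 * x) : ordenaKey n x = 2 * (2 * x - (n - 1)) + 1 := by
  unfold ordenaKey
  rw [abs_of_nonneg (by omega), if_pos (by omega)]

theorem pairsIdx_pairwise (n : Int) : ∀ (k : Nat) (e d : Int), e + d = n - 1 → e < d →
    (pairsIdx k e d).Pairwise (fun a b => ordenaKey n a < ordenaKey n b) := by
  intro k
  induction k with
  | zero => intro e d _ _; simp [pairsIdx]
  | succ k ih =>
    intro e d hsum hlt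
    have key_e : ordenaKey n e = 2 * (n - 1 - 2 * e) := ordenaKey_left (by omega)
    have key_d : ordenaKey n d = 2 * (n - 1 - 2 * e) + 1 := by
      rw [ordenaKey_right (by omega)]; omega
    have htail : ∀ x ∈ pairsIdx k (e - 1) (d + 1), ordenaKey n d < ordenaKey n x := by
      intro x hx
      rcases mem_pairsIdx k (e - 1) (d + 1) hx with h' | h'
      · rw [key_d, ordenaKey_left (by omega)]; omega
      · rw [key_d, ordenaKey_right (by omega)]; omega
    refine List.Pairwise.cons ?_ (List.Pairwise.cons ?_ (ih (e - 1) (d + 1) (by omega) (by omega)))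
    · intro x hx
      rcases List.mem_cons.mp hx with rfl | hx'
      · omega
      · exact lt_trans (by omega) (htail x hx')
    · exact htail

theorem pairsIdx_perm : ∀ (k : Nat) (e d : Int),
    (pairsIdx k e d).Perm (PySem.List.pyRange (e - k + 1) (e + 1) 1 ++ PySem.List.pyRange d (d + k) 1) := by
  intro k
  induction k with
  | zero =>
    intro e d
    simp [pairsIdx]
  | succ k ih =>
    intro e d
    have ih' := ih (e - 1) (d + 1)
    have h1 : (e - 1 : Int) - k + 1 = e - (k + 1 : Nat) + 1 := by push_cast; omega
    have h2 : (e - 1 : Int) + 1 = e := by omega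
    have h3 : (d + 1 : Int) + k = d + (k + 1 : Nat) := by push_cast; omega
    rw [h1, h2, h3] at ih'
    have hL : PySem.List.pyRange (e - (k + 1 : Nat) + 1) (e + 1) 1
        = PySem.List.pyRange (e - (k + 1 : Nat) + 1) e 1 ++ [e] := by
      rw [← PySem.List.pyRange_one_succ_right (by push_cast; omega)]
    have hR : PySem.List.pyRange d (d + (k + 1 : Nat)) 1
        = d :: PySem.List.pyRange (d + 1) (d + (k + 1 : Nat)) 1 := by
      rw [← PySem.List.pyRange_one_cons (by push_cast; omega)]
    rw [hL, hR]
    refine ((ih'.cons d).cons e).trans ?_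
    refine (List.Perm.cons e List.perm_middle.symm).trans ?_
    refine (List.perm_middle.symm).trans ?_
    simp

theorem ordenaLoop_eq (lista : List Int) (n : Int) (hn : n = (lista.length : Int)) :
    ∀ (fuel : Nat) (e d : Int) (res : List Int), e + d = n - 1 → (e + 1).toNat ≤ fuel →
    ordenaLoop lista n fuel res e d
      = res ++ (pairsIdx (e + 1).toNat e d).map (fun i => PySem.List.pyGetD lista i 0) := by
  intro fuel
  induction fuel with
  | zero =>
    intro e d res hsum hf
    have : (e + 1).toNat = 0 := by omega
    rw [this]
    simp [ordenaLoop, pairsIdx]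
  | succ fuel ih =>
    intro e d res hsum hf
    by_cases he : 0 ≤ e
    · have hcond : e ≥ 0 ∧ d < n := ⟨he, by omega⟩
      have htn : (e + 1).toNat = e.toNat + 1 := by omega
      rw [htn]
      simp only [ordenaLoop, if_pos hcond]
      have htn' : ((e - 1) + 1).toNat = e.toNat := by omega
      rw [ih (e - 1) (d + 1) _ (by omega) (by omega), htn']
      simp [pairsIdx]
    · have hcond : ¬ (e ≥ 0 ∧ d < n) := by omega
      have : (e + 1).toNat = 0 := by omega
      rw [this]
      simp [ordenaLoop, if_neg hcond, pairsIdx]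

theorem sorted_idx_even (m q : Nat) (hqq : m = q + q) :
    PySem.List.sorted (PySem.List.pyRange 0 (m : Int) 1) (ordenaKey (m : Int))
      = pairsIdx q ((q : Int) - 1) (q : Int) := by
  apply PySem.List.sorted_eq_of_perm_of_pairwise_lt
  · have hp := pairsIdx_perm q ((q : Int) - 1) (q : Int)
    have h1 : (q : Int) - 1 - q + 1 = 0 := by omega
    have h2 : (q : Int) - 1 + 1 = q := by omega
    have h3 : (q : Int) + q = (m : Int) := by omega
    rw [h1, h2, h3] at hp
    rw [PySem.List.pyRange_one_append 0 (q : Int) (m : Int) (by omega) (by omega)]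
    exact hp
  · exact pairsIdx_pairwise (m : Int) q ((q : Int) - 1) (q : Int) (by omega) (by omega)

theorem sorted_idx_odd (m q : Nat) (hqq : m = q + q + 1) :
    PySem.List.sorted (PySem.List.pyRange 0 (m : Int) 1) (ordenaKey (m : Int))
      = (q : Int) :: pairsIdx q ((q : Int) - 1) ((q : Int) + 1) := by
  apply PySem.List.sorted_eq_of_perm_of_pairwise_lt
  · have hp := pairsIdx_perm q ((q : Int) - 1) ((q : Int) + 1)
    have h1 : (q : Int) - 1 - q + 1 = 0 := by omega
    have h2 : (q : Int) - 1 + 1 = q := by omega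
    have h3 : (q : Int) + 1 + q = (m : Int) := by omega
    rw [h1, h2, h3] at hp
    refine ((hp.cons (q : Int)).trans List.perm_middle.symm).trans ?_
    rw [PySem.List.pyRange_one_append 0 (q : Int) (m : Int) (by omega) (by omega),
        PySem.List.pyRange_one_cons (show (q : Int) < (m : Int) by omega)]
  · refine List.Pairwise.cons ?_ (pairsIdx_pairwise (m : Int) q ((q : Int) - 1) ((q : Int) + 1) (by omega) (by omega))
    intro x hx
    have hkq : ordenaKey (m : Int) (q : Int) = 0 := by
      rw [ordenaKey_left (by omega)]; omega
    rcases mem_pairsIdx q ((q : Int) - 1) ((q : Int) + 1) hx with h' | h'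
    · rw [hkq, ordenaKey_left (by omega)]; omega
    · rw [hkq, ordenaKey_right (by omega)]; omega

-- ===== VERDICT (by name: the statement is the Claim_ definition above) =====
theorem ordena_adj_spec : Claim_equal_ordena_adj := by
  intro lista _
  unfold Spec_ordena_adj ordena_adj ordena_adj_alt
  simp only [PySem.List.len_eq]
  have hfd : PySem.Int.floordiv (lista.length : Int) 2 = ((lista.length / 2 : Nat) : Int) := by
    exact_mod_cast PySem.Int.floordiv_natCast lista.length 2
  have hmd : PySem.Int.mod (lista.length : Int) 2 = ((lista.length % 2 : Nat) : Int) := by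
    exact_mod_cast PySem.Int.mod_natCast lista.length 2
  rw [hfd, hmd]
  set m := lista.length with hm
  set q := m / 2 with hq
  by_cases hpar : m % 2 = 0
  · have hqq : m = q + q := by omega
    rw [if_pos (by omega)]
    have hA := ordenaLoop_eq lista (m : Int) (by rw [hm]) m ((q : Int) - 1) (q : Int) []
      (by omega) (by omega)
    have ht : ((q : Int) - 1 + 1).toNat = q := by omega
    rw [ht] at hA
    rw [hA, sorted_idx_even m q hqq]
    simp
  · have hqq : m = q + q + 1 := by omega
    rw [if_neg (by omega)]
    have hA := ordenaLoop_eq lista (m : Int) (by rw [hm]) m ((q : Int) - 1) ((q : Int) + 1)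
      [PySem.List.pyGetD lista (q : Int) 0] (by omega) (by omega)
    have ht : ((q : Int) - 1 + 1).toNat = q := by omega
    rw [ht] at hA
    rw [hA, sorted_idx_odd m q hqq]
    simp
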